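-- pv_equiv track=rewrite | github.com/Devesh511/project_DataCommunication | datalinklayer/bit_stuffing.py | en_frame
-- ===== SOURCE A (Python) =====
-- flag = "01111110"
--
-- def en_frame(data):
-- 	frame = ""
-- 	count_1 = 0
-- 	for k in data:
-- 		if k == "1":
-- 			count_1 += 1
-- 		else:
-- 			count_1 = 0
--
-- 		if count_1 == 5:
-- 			count_1 = 0
-- 			frame += "10"
-- 		else:
-- 			frame += k
-- 	return flag + frame +flag
-- ===== SOURCE B (Python) =====
-- flag = "01111110"
--
-- def en_frame(data):
--     out = [flag]
--     i, n = 0, len(data)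
--     while i < n:
--         if data[i] == "1":
--             j = i
--             while j < n and data[j] == "1":
--                 j += 1
--             for t in range(j - i):
--                 out.append("10" if (t + 1) % 5 == 0 else "1")
--             i = j
--         else:
--             out.append(data[i])
--             i += 1
--     out.append(flag)
--     return "".join(out)
-- ===== Notes on version B (the rewrite author's own statement) =====
-- stated objective: alternative
-- what changed: Replaces the per-character counter-with-reset state machine by a run-scanning two-pointer pass: each maximal run of ones is located and stuffed as a block (a zero inserted after every fifth one), other characters pass through; pieces are collected in a list and joined once instead of repeated string concatenation.
import Mathlib
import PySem

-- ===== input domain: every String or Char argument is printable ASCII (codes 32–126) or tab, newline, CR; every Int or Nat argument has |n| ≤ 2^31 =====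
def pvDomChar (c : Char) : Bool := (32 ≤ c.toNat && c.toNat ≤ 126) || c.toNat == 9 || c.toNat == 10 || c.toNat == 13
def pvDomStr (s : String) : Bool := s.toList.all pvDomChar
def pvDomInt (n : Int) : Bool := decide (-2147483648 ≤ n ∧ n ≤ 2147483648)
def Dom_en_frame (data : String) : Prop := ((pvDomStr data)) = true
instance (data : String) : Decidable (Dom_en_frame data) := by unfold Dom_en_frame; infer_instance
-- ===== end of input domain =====

-- B replaces A's per-character counter state machine by a run-scanning pass over maximal runs of '1's.

-- ===== PORT A =====
-- A's loop body: carries (frame, count_1); appends "10" when the count hits 5, else the character.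
def pvStepA (st : List Char × Int) (k : Char) : List Char × Int :=
  let c : Int := if k == '1' then st.2 + 1 else 0
  if c == 5 then (st.1 ++ ['1', '0'], 0) else (st.1 ++ [k], c)

def en_frame (data : String) : String :=
  let r := data.toList.foldl pvStepA ([], 0)
  String.mk ("01111110".toList ++ r.1 ++ "01111110".toList)

-- ===== PORT B =====
-- stuffed output for a maximal run of m consecutive '1's ('10' after every fifth)
def pvStuffOnes (m : Nat) : List Char :=
  (List.range m).flatMap (fun t => if (t + 1) % 5 == 0 then ['1', '0'] else ['1'])

-- run scan: a maximal run of '1's is taken as a block, other characters pass through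
def pvAltGo : List Char → List Char
  | [] => []
  | k :: rest =>
    if k == '1' then
      pvStuffOnes ((k :: rest).takeWhile (fun x => x == '1')).length
        ++ pvAltGo ((k :: rest).dropWhile (fun x => x == '1'))
    else k :: pvAltGo rest
termination_by l => l.length
decreasing_by
  · simp only [List.dropWhile_cons, *, if_pos, List.length_cons]
    exact Nat.lt_succ_of_le (List.length_dropWhile_le _ _)
  · simp

def en_frame_alt (data : String) : String :=
  String.mk ("01111110".toList ++ pvAltGo data.toList ++ "01111110".toList)

-- ===== PRECONDITION & SPEC =====
def Spec_en_frame (data : String) (out : String) : Prop := out = en_frame_alt data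
instance (data : String) (out : String) : Decidable (Spec_en_frame data out) := by unfold Spec_en_frame; infer_instance

-- ===== CLAIM (what is proved, stated in full; the proofs are below) =====
def Claim_equal_en_frame : Prop := ∀ (data : String), Dom_en_frame data → Spec_en_frame data (en_frame data)

-- ===== LEMMAS AND PROOFS =====

-- restructured form of A's loop: counter as Nat, output built front-to-back
def pvG (c : Nat) : List Char → List Char
  | [] => []
  | k :: rest =>
    if k == '1' then
      if c + 1 = 5 then '1' :: '0' :: pvG 0 rest else '1' :: pvG (c + 1) rest
    else k :: pvG 0 rest

-- stuffed run starting at counter c, and the counter after the run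
def pvSF (c : Nat) : Nat → List Char
  | 0 => []
  | m + 1 => if c + 1 = 5 then '1' :: '0' :: pvSF 0 m else '1' :: pvSF (c + 1) m

def pvEC (c : Nat) : Nat → Nat
  | 0 => c
  | m + 1 => if c + 1 = 5 then pvEC 0 m else pvEC (c + 1) m

lemma pvFoldA (l : List Char) (acc : List Char) (c : Nat) :
    (l.foldl pvStepA (acc, (c : Int))).1 = acc ++ pvG c l := by
  induction l generalizing acc c with
  | nil => simp [pvG]
  | cons k rest ih =>
    rw [List.foldl_cons]
    by_cases hk : (k == '1') = true
    · have hk1 : k = '1' := by simpa using hk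
      subst hk1
      by_cases hc : c + 1 = 5
      · have h5 : ((c : Int) + 1 == 5) = true := by
          simp; exact_mod_cast congrArg (Nat.cast (R := Int)) hc
        rw [show pvStepA (acc, (c : Int)) '1' = (acc ++ ['1', '0'], ((0 : Nat) : Int)) from by
          simp [pvStepA, h5], ih]
        simp [pvG, hc]
      · have h5 : ((c : Int) + 1 == 5) = false := by simp; omega
        rw [show pvStepA (acc, (c : Int)) '1' = (acc ++ ['1'], ((c + 1 : Nat) : Int)) from by
          simp [pvStepA, h5], ih]
        simp [pvG, hc]
    · have hk' : (k == '1') = false := by simpa using hk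
      rw [show pvStepA (acc, (c : Int)) k = (acc ++ [k], ((0 : Nat) : Int)) from by
        simp [pvStepA, hk'], ih]
      simp [pvG, hk']

-- pvG on a run of ones followed by the rest
lemma pvG_replicate (m : Nat) (d : List Char) (c : Nat) :
    pvG c (List.replicate m '1' ++ d) = pvSF c m ++ pvG (pvEC c m) d := by
  induction m generalizing c with
  | zero => simp [pvSF, pvEC]
  | succ m ih =>
    by_cases hc : c + 1 = 5 <;> simp [List.replicate_succ, pvG, pvSF, pvEC, hc, ih]

-- the counter is irrelevant when the next character is not '1'
lemma pvG_not_one (d : List Char) (c c' : Nat)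
    (hd : ∀ x ∈ d.head?, (x == '1') = false) : pvG c d = pvG c' d := by
  cases d with
  | nil => rfl
  | cons k rest =>
    have hk : (k == '1') = false := hd k (by simp)
    simp [pvG, hk]

-- pvSF at counter c is the modular description of the run stuffing
lemma pvSF_mod (m : Nat) : ∀ c : Nat, c < 5 →
    pvSF c m = (List.range m).flatMap
      (fun t => if ((c + t + 1) % 5 == 0) = true then ['1', '0'] else ['1']) := by
  induction m with
  | zero => intro c _; simp [pvSF]
  | succ m ih =>
    intro c hc
    rw [List.range_succ_eq_map, List.flatMap_cons, List.flatMap_map]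
    by_cases h5 : c + 1 = 5
    · have h0 : ((c + 0 + 1) % 5 == 0) = true := by simp; omega
      rw [h0, if_pos rfl]
      have hcg : List.flatMap
            (fun a => (fun t => if ((c + t + 1) % 5 == 0) = true then ['1', '0'] else ['1']) (a + 1))
            (List.range m)
          = List.flatMap
            (fun t => if ((0 + t + 1) % 5 == 0) = true then ['1', '0'] else ['1'])
            (List.range m) := by
        refine List.flatMap_congr (fun a _ => ?_)
        have h : (c + (a + 1) + 1) % 5 = (0 + a + 1) % 5 := by omega
        simp only [h]
      rw [hcg, ← ih 0 (by omega)]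
      simp [pvSF, h5]
    · have h0 : ((c + 0 + 1) % 5 == 0) = false := by simp; omega
      rw [h0, if_neg (by simp)]
      have hcg : List.flatMap
            (fun a => (fun t => if ((c + t + 1) % 5 == 0) = true then ['1', '0'] else ['1']) (a + 1))
            (List.range m)
          = List.flatMap
            (fun t => if ((c + 1 + t + 1) % 5 == 0) = true then ['1', '0'] else ['1'])
            (List.range m) := by
        refine List.flatMap_congr (fun a _ => ?_)
        have h : (c + (a + 1) + 1) % 5 = (c + 1 + a + 1) % 5 := by omega
        simp only [h]
      rw [hcg, ← ih (c + 1) (by omega)]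
      simp [pvSF, h5]

lemma pvSF_zero_eq (m : Nat) : pvSF 0 m = pvStuffOnes m := by
  rw [pvSF_mod m 0 (by omega)]
  simp [pvStuffOnes]

-- main: A's restructured loop from counter 0 is B's run scan
lemma pvG_eq_altGo : ∀ (n : Nat) (l : List Char), l.length ≤ n → pvG 0 l = pvAltGo l := by
  intro n
  induction n with
  | zero =>
    intro l hl
    have : l = [] := List.eq_nil_of_length_eq_zero (by omega)
    subst this; simp [pvG, pvAltGo]
  | succ n ih =>
    intro l hl
    cases l with
    | nil => simp [pvG, pvAltGo]
    | cons k rest =>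
      by_cases hk : (k == '1') = true
      · have hk1 : k = '1' := by simpa using hk
        subst hk1
        have hrun : ∀ x ∈ (('1' :: rest).takeWhile (fun x => x == '1')), x = '1' := by
          intro x hx
          simpa using List.mem_takeWhile_imp hx
        have hrep : ('1' :: rest).takeWhile (fun x => x == '1')
            = List.replicate (('1' :: rest).takeWhile (fun x => x == '1')).length '1' :=
          List.eq_replicate_of_mem hrun
        have hsplit := List.takeWhile_append_dropWhile
          (p := fun x => x == '1') (l := '1' :: rest)
        set t := ('1' :: rest).takeWhile (fun x => x == '1') with ht
        set d := ('1' :: rest).dropWhile (fun x => x == '1') with hd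
        have hstart : pvG 0 ('1' :: rest) = pvG 0 (List.replicate t.length '1' ++ d) := by
          rw [← hrep, hsplit]
        rw [hstart, pvG_replicate]
        have hdh : ∀ x ∈ d.head?, (x == '1') = false := by
          intro x hx
          have hfind := List.find?_not_eq_head?_dropWhile
            (p := fun x => x == '1') (l := '1' :: rest)
          rw [← hd] at hfind
          rw [← hfind] at hx
          have := List.find?_some hx
          simpa using this
        rw [pvG_not_one d _ 0 hdh, pvSF_zero_eq]
        have hdlen : d.length ≤ n := by
          have h1 : d.length ≤ rest.length := by
            rw [hd]
            simp only [List.dropWhile_cons, show (('1' : Char) == '1') = true from rfl, if_pos]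
            exact List.length_dropWhile_le _ _
          simp only [List.length_cons] at hl; omega
        rw [ih d hdlen]
        simp only [pvAltGo, show (('1' : Char) == '1') = true from rfl, if_pos, ← ht, ← hd]
      · have hk' : (k == '1') = false := by simpa using hk
        simp only [pvG, pvAltGo, hk', Bool.false_eq_true, if_false]
        have : rest.length ≤ n := by simp only [List.length_cons] at hl; omega
        rw [ih rest this]

-- ===== VERDICT (by name: the statement is the Claim_ definition above) =====
theorem en_frame_spec : Claim_equal_en_frame := by
  intro data _
  show en_frame data = en_frame_alt data
  show String.mk ("01111110".toList ++ (data.toList.foldl pvStepA ([], 0)).1 ++ "01111110".toList)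
      = en_frame_alt data
  rw [show ((0 : Int)) = ((0 : Nat) : Int) from rfl, pvFoldA, List.nil_append,
    pvG_eq_altGo data.toList.length data.toList (le_refl _)]
  rfl
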